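-- pv_equiv track=rewrite | github.com/RuipuZhao/- | 1.py | min_subsequences
-- ===== SOURCE A (Python) =====
-- def min_subsequences(source, target):
--
--     def find_subsequence(src, tgt):
--         src_index, tgt_index = 0, 0
--         while src_index < len(src) and tgt_index < len(tgt):
--             if src[src_index] == tgt[tgt_index]:
--                 tgt_index += 1
--             src_index += 1
--         return tgt_index
--
--     count = 0
--     current_index = 0
--     while current_index < len(target):
--         matched = find_subsequence(source, target[current_index:])
--         if matched == 0:
--             return -1
--         current_index += matched
--         count += 1
--
--     return count
-- ===== SOURCE B (Python) =====
-- def min_subsequences(source, target):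
--     if not target:
--         return 0
--     count = 1
--     rest = source
--     for ch in target:
--         i = rest.find(ch)
--         if i == -1:
--             count += 1
--             rest = source
--             i = rest.find(ch)
--             if i == -1:
--                 return -1
--         rest = rest[i + 1:]
--     return count
-- ===== Notes on version B (the rewrite author's own statement) =====
-- stated objective: idiomatic
-- what changed: Instead of re-running a two-pointer find_subsequence scan on a fresh target slice for every pass, B makes a single pass over the target characters, carrying the unconsumed suffix of source and using one str.find per character (restarting on a full source only when the suffix is exhausted).
import Mathlib
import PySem

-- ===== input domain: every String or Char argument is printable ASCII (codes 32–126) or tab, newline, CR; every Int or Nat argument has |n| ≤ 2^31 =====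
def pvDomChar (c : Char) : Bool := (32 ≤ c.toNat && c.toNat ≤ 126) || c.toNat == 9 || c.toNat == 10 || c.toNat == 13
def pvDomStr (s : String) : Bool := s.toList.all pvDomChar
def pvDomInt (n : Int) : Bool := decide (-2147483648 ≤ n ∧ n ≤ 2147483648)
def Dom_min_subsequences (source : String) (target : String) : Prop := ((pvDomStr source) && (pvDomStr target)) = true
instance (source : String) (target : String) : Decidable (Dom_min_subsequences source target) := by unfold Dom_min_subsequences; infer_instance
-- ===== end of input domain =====

-- B replaces A's per-chunk restart of the two-pointer scan (rescanning source for every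
-- chunk via find_subsequence on a fresh slice) by a single pass over target that carries
-- the unconsumed suffix of source, using one find per target character (objective: alternative/idiomatic).

-- ===== PORT A =====
-- find_subsequence: two-pointer scan, returns number of tgt chars matched greedily in src
def findSub : List Char → List Char → Nat
  | [], _ => 0
  | _ :: _, [] => 0
  | s :: ss, c :: ts => if s == c then 1 + findSub ss ts else findSub ss (c :: ts)

-- outer while-loop of A over the remaining target suffix (target[current_index:] = drop)
def loopA (src : List Char) (t : List Char) (count : Int) : Int :=
  if h : t = [] then count
  else if hm : findSub src t = 0 then -1
  else loopA src (t.drop (findSub src t)) (count + 1)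
termination_by t.length
decreasing_by
  have h1 : t.length ≠ 0 := fun e => h (List.eq_nil_of_length_eq_zero e)
  simp only [List.length_drop]
  omega

def min_subsequences (source : String) (target : String) : Int :=
  loopA source.toList target.toList 0

-- ===== PORT B =====
-- ports `rest.find(ch)` followed by `rest[i+1:]` (exact: str.find scans left to right,
-- −1 i.e. not found ↦ none, otherwise the suffix after the first occurrence)
def afterCh : List Char → Char → Option (List Char)
  | [], _ => none
  | x :: xs, c => if x == c then some xs else afterCh xs c

-- B's for-loop over target, carrying (rest of source, count)
def loopB (src : List Char) : List Char → List Char → Int → Int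
  | [], _, count => count
  | c :: ts, rest, count =>
    match afterCh rest c with
    | some r => loopB src ts r count
    | none =>
      match afterCh src c with
      | some r => loopB src ts r (count + 1)
      | none => -1

def min_subsequences_alt (source : String) (target : String) : Int :=
  if target.toList = [] then 0
  else loopB source.toList target.toList source.toList 1

-- ===== PRECONDITION & SPEC =====
def Spec_min_subsequences (source : String) (target : String) (out : Int) : Prop := out = min_subsequences_alt source target
instance (source : String) (target : String) (out : Int) : Decidable (Spec_min_subsequences source target out) := by unfold Spec_min_subsequences; infer_instance

-- ===== CLAIM (what is proved, stated in full; the proofs are below) =====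
def Claim_equal_min_subsequences : Prop := ∀ (source : String) (target : String), Dom_min_subsequences source target → Spec_min_subsequences source target (min_subsequences source target)

-- ===== LEMMAS AND PROOFS =====

theorem loopA_nil (src : List Char) (c : Int) : loopA src [] c = c := by
  simp [loopA]

theorem loopA_cons (src : List Char) (t : List Char) (c : Int) (h : t ≠ []) :
    loopA src t c =
      (if findSub src t = 0 then -1 else loopA src (t.drop (findSub src t)) (c + 1)) := by
  rw [loopA]; simp [h]

-- inner stepping: the two-pointer match of (c :: ts) in ss factors through afterCh
theorem findSub_cons (ss : List Char) (c : Char) (ts : List Char) :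
    findSub ss (c :: ts) =
      (match afterCh ss c with
       | none => 0
       | some r => 1 + findSub r ts) := by
  induction ss with
  | nil => simp [findSub, afterCh]
  | cons x xs ih =>
    by_cases hx : x == c
    · simp [findSub, afterCh, hx]
    · simp [findSub, afterCh, hx, ih]

theorem findSub_le (ss t : List Char) : findSub ss t ≤ t.length := by
  induction ss generalizing t with
  | nil => cases t <;> simp [findSub]
  | cons x xs ih =>
    cases t with
    | nil => simp [findSub]
    | cons c ts =>
      by_cases hx : x == c
      · simp [findSub, hx]; have := ih ts; omega
      · simp [findSub, hx]; exact ih (c :: ts)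

-- main invariant: B mid-pass with remaining source `rest` equals A restarted at the
-- point where the greedy match in `rest` gets stuck
theorem loopB_eq (src : List Char) :
    ∀ (t rest : List Char) (c : Int),
      loopB src t rest c =
        (if findSub rest t = t.length then c
         else loopA src (t.drop (findSub rest t)) c) := by
  intro t
  induction t with
  | nil => intro rest c; cases rest <;> simp [loopB, findSub]
  | cons c0 ts ih =>
    intro rest c
    rw [findSub_cons]
    cases hA : afterCh rest c0 with
    | some r =>
      have hd : (c0 :: ts).drop (1 + findSub r ts) = ts.drop (findSub r ts) := by
        rw [Nat.add_comm, List.drop_succ_cons]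
      simp only [loopB, hA, ih r c]
      rw [hd]
      by_cases hEq : findSub r ts = ts.length
      · rw [if_pos hEq, if_pos (show 1 + findSub r ts = (c0 :: ts).length by
          simp [hEq, Nat.add_comm])]
      · rw [if_neg hEq, if_neg (show ¬(1 + findSub r ts = (c0 :: ts).length) by
          simp only [List.length_cons]; omega)]
    | none =>
      have hne0 : ¬((0 : Nat) = (c0 :: ts).length) := by simp
      simp only [loopB, hA]
      rw [if_neg hne0, List.drop_zero, loopA_cons src (c0 :: ts) c (by simp), findSub_cons]
      cases hB : afterCh src c0 with
      | none => simp
      | some r =>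
        have hd : (c0 :: ts).drop (1 + findSub r ts) = ts.drop (findSub r ts) := by
          rw [Nat.add_comm, List.drop_succ_cons]
        simp only
        rw [if_neg (show ¬(1 + findSub r ts = 0) by omega), hd, ih r (c + 1)]
        by_cases hEq : findSub r ts = ts.length
        · rw [if_pos hEq, hEq, List.drop_length, loopA_nil]
        · rw [if_neg hEq]

-- ===== VERDICT (by name: the statement is the Claim_ definition above) =====
theorem min_subsequences_spec : Claim_equal_min_subsequences := by
  intro source target _
  unfold Spec_min_subsequences min_subsequences min_subsequences_alt
  by_cases ht : target.toList = []
  · simp [ht, loopA_nil]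
  · rw [if_neg ht, loopB_eq]
    have hlen : target.toList.length ≠ 0 := fun e => ht (List.eq_nil_of_length_eq_zero e)
    have hle := findSub_le source.toList target.toList
    rw [loopA_cons source.toList target.toList 0 ht]
    by_cases h0 : findSub source.toList target.toList = 0
    · rw [if_pos h0,
        if_neg (show ¬(findSub source.toList target.toList = target.toList.length) by omega),
        h0, List.drop_zero, loopA_cons source.toList target.toList 1 ht, if_pos h0]
    · rw [if_neg h0]
      by_cases hEq : findSub source.toList target.toList = target.toList.length
      · rw [if_pos hEq, hEq, List.drop_length, loopA_nil]; norm_num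
      · rw [if_neg hEq]; norm_num
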